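-- pv_equiv track=rewrite | github.com/rtehok/perso-python | leetcode/1402_reducing_dishes.py | maxSatisfactionTopDownDP
-- ===== SOURCE A (Python) =====
-- from typing import List
--
-- def maxSatisfactionTopDownDP(satisfaction: List[int]) -> int:
--     satisfaction.sort()
--     n = len(satisfaction)
--     memo = [[-1] * (n + 1) for _ in range(n + 1)]
--
--     def findMax(index, time):
--         if index == n:
--             return 0
--
--         if memo[index][time] != -1:
--             return memo[index][time]
--
--         memo[index][time] = max(satisfaction[index] * time + findMax(index + 1, time + 1),
--                                 findMax(index + 1, time))
--
--         return memo[index][time]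
--
--     return findMax(0, 1)
-- ===== SOURCE B (Python) =====
-- def maxSatisfactionTopDownDP(satisfaction):
--     # Greedy: sort ascending (in place, like A), then take dishes from the
--     # largest down while the running suffix sum stays positive.
--     satisfaction.sort()
--     total = 0
--     res = 0
--     for x in reversed(satisfaction):
--         total += x
--         if total <= 0:
--             break
--         res += total
--     return res
-- ===== Notes on version B (the rewrite author's own statement) =====
-- stated objective: faster
-- what changed: Replaced the O(n^2) memoized take/skip DP with the classic greedy: sort, then accumulate a suffix sum from the largest dish down, adding it to the answer while it stays positive.
import Mathlib
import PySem

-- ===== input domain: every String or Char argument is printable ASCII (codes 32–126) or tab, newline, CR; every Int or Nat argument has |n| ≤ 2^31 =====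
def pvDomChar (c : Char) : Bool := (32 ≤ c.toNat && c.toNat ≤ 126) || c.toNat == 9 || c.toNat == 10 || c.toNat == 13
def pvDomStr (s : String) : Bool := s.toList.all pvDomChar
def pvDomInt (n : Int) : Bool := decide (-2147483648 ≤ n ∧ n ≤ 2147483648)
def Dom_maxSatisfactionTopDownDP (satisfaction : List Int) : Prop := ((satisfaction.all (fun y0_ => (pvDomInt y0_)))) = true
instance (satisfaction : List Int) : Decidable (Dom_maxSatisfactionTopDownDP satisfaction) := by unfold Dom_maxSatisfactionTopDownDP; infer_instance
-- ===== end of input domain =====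

-- B replaces A's O(n^2) memoized take/skip DP by the greedy suffix-sum scan over the
-- sorted dishes (asymptotically faster). Both Pythons sort the argument in place; the
-- equivalence proved here is about the RETURN value (the mutation is identical anyway).

-- ===== PORT A =====
-- A's inner findMax, with the memo table threaded explicitly (keyed by (index, time),
-- default -1 as in the Python 2D list); the guard 'n ≤ index' is Python's 'index == n'
-- made total (recursive calls only ever reach index ≤ n, where the two coincide).
def pyFindMax (s : List Int) (n : Nat) (index time : Nat)
    (memo : PySem.Dict (Nat × Nat) Int) : Int × PySem.Dict (Nat × Nat) Int :=
  if n ≤ index then (0, memo)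
  else
    let cur := memo.getD (index, time) (-1)
    if cur ≠ -1 then (cur, memo)
    else
      let r1 := pyFindMax s n (index + 1) (time + 1) memo
      let r2 := pyFindMax s n (index + 1) time r1.2
      -- satisfaction[index] * time: index < n = s.length here, so getD is the plain access
      let v := max (s.getD index 0 * (time : Int) + r1.1) r2.1
      (v, r2.2.insert (index, time) v)
termination_by n - index
decreasing_by all_goals omega

def maxSatisfactionTopDownDP (satisfaction : List Int) : Int :=
  let s := PySem.List.sorted satisfaction (fun x => x) false
  (pyFindMax s s.length 0 1 PySem.Dict.empty).1

-- ===== PORT B =====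
-- B's loop over reversed(sorted(satisfaction)) with accumulators total and res
def greedyLoop : List Int → Int → Int → Int
  | [], _, res => res
  | x :: xs, total, res =>
    let t := total + x
    if t ≤ 0 then res else greedyLoop xs t (res + t)

def maxSatisfactionTopDownDP_alt (satisfaction : List Int) : Int :=
  greedyLoop (PySem.List.sorted satisfaction (fun x => x) false).reverse 0 0

-- ===== PRECONDITION & SPEC =====
def Spec_maxSatisfactionTopDownDP (satisfaction : List Int) (out : Int) : Prop := out = maxSatisfactionTopDownDP_alt satisfaction
instance (satisfaction : List Int) (out : Int) : Decidable (Spec_maxSatisfactionTopDownDP satisfaction out) := by unfold Spec_maxSatisfactionTopDownDP; infer_instance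

-- ===== CLAIM (what is proved, stated in full; the proofs are below) =====
def Claim_equal_maxSatisfactionTopDownDP : Prop := ∀ (satisfaction : List Int), Dom_maxSatisfactionTopDownDP satisfaction → Spec_maxSatisfactionTopDownDP satisfaction (maxSatisfactionTopDownDP satisfaction)

-- ===== LEMMAS AND PROOFS =====

-- The memo-free value of A's recursion on the suffix s.drop index at time t
def fRec : List Int → Int → Int
  | [], _ => 0
  | x :: xs, t => max (x * t + fRec xs (t + 1)) (fRec xs t)

-- weighted value of taking ALL of the list, first dish at time t
def wval : List Int → Int → Int
  | [], _ => 0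
  | x :: xs, t => x * t + wval xs (t + 1)

-- best over suffixes (the optimum is always attained on a suffix of the sorted list)
def gRec : List Int → Int → Int
  | [], _ => 0
  | x :: xs, t => max (gRec xs t) (x * t + wval xs (t + 1))

-- running greedy quantities on the REVERSED (descending) list:
-- W r t = sum over prefixes j of (t + sum of first j); M r t = max over prefixes
def wSum : List Int → Int → Int
  | [], _ => 0
  | x :: r, t => (t + x) + wSum r (t + x)

def mPre : List Int → Int → Int
  | [], _ => 0
  | x :: r, t => max 0 ((t + x) + mPre r (t + x))

theorem mPre_nonneg (r : List Int) (t : Int) : 0 ≤ mPre r t := by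
  cases r with
  | nil => simp [mPre]
  | cons x xs => simp [mPre]

theorem wval_succ (s : List Int) : ∀ t : Int, wval s (t + 1) = wval s t + s.sum := by
  induction s with
  | nil => intro t; simp [wval]
  | cons x xs ih => intro t; simp only [wval, List.sum_cons, ih]; ring

theorem wSum_snoc (r : List Int) (x : Int) : ∀ t : Int,
    wSum (r ++ [x]) t = wSum r t + (t + r.sum + x) := by
  induction r with
  | nil => intro t; simp [wSum]
  | cons y r ih => intro t; simp only [List.cons_append, wSum, ih, List.sum_cons]; ring

theorem wSum_rev (s : List Int) : wSum s.reverse 0 = wval s 1 := by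
  induction s with
  | nil => simp [wSum, wval]
  | cons x xs ih =>
    rw [List.reverse_cons, wSum_snoc, ih, List.sum_reverse]
    have h2 : wval xs (1 + 1) = wval xs 1 + xs.sum := wval_succ xs 1
    simp only [wval]
    omega

theorem mPre_snoc (r : List Int) (x : Int) : ∀ t : Int,
    mPre (r ++ [x]) t = max (mPre r t) (wSum (r ++ [x]) t) := by
  induction r with
  | nil => intro t; simp [mPre, wSum]
  | cons y r ih =>
    intro t
    simp only [List.cons_append, mPre, ih, wSum]
    rw [show (t + y) + max (mPre r (t + y)) (wSum (r ++ [x]) (t + y))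
          = max ((t + y) + mPre r (t + y)) ((t + y) + wSum (r ++ [x]) (t + y)) from
        (max_add_add_left _ _ _).symm]
    rw [← max_assoc]

theorem gRec_eq_mPre_rev (s : List Int) : gRec s 1 = mPre s.reverse 0 := by
  induction s with
  | nil => simp [gRec, mPre]
  | cons x xs ih =>
    rw [List.reverse_cons, mPre_snoc, ← ih, ← List.reverse_cons, wSum_rev]
    simp [gRec, wval]

theorem greedyLoop_acc (r : List Int) : ∀ total res : Int,
    greedyLoop r total res = res + greedyLoop r total 0 := by
  induction r with
  | nil => intro total res; simp [greedyLoop]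
  | cons x xs ih =>
    intro total res
    simp only [greedyLoop]
    by_cases h : total + x ≤ 0
    · simp [h]
    · simp only [if_neg h]
      rw [ih (total + x) (res + (total + x)), ih (total + x) (0 + (total + x))]
      ring

-- once the running total is ≤ 0 on an all-nonpositive tail, the best prefix value is ≤ -t
theorem mPre_le_neg (r : List Int) : ∀ t : Int, (∀ y ∈ r, y ≤ 0) → t ≤ 0 → mPre r t ≤ -t := by
  induction r with
  | nil => intro t _ ht; simp [mPre]; omega
  | cons x xs ih =>
    intro t hall ht
    have hx : x ≤ 0 := hall x (by simp)
    have h1 : mPre xs (t + x) ≤ -(t + x) := ih (t + x) (fun y hy => hall y (by simp [hy])) (by omega)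
    simp only [mPre]
    omega

theorem greedyLoop_eq_mPre (r : List Int) : ∀ total : Int, 0 ≤ total →
    r.Pairwise (fun a b => b ≤ a) → greedyLoop r total 0 = mPre r total := by
  induction r with
  | nil => intro total _ _; simp [greedyLoop, mPre]
  | cons x xs ih =>
    intro total htot hsort
    rw [List.pairwise_cons] at hsort
    simp only [greedyLoop, mPre]
    by_cases h : total + x ≤ 0
    · have hx : x ≤ 0 := by omega
      have hxs : ∀ y ∈ xs, y ≤ 0 := fun y hy => le_trans (hsort.1 y hy) hx
      have := mPre_le_neg xs (total + x) hxs h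
      simp only [if_pos h]
      omega
    · simp only [if_neg h]
      rw [greedyLoop_acc, ih (total + x) (by omega) hsort.2]
      have := mPre_nonneg xs (total + x)
      omega

-- exchange step: with x below every element of xs and 0 ≤ t, taking x now and then the
-- best choice on xs is never better than the best suffix choice
theorem exchange (xs : List Int) : ∀ (x t : Int), 0 ≤ t → (∀ y ∈ xs, x ≤ y) →
    x * t + gRec xs (t + 1) ≤ max (gRec xs t) (x * t + wval xs (t + 1)) := by
  induction xs with
  | nil => intro x t _ _; simp [gRec, wval]
  | cons y ys ih =>
    intro x t ht hall
    have hxy : x ≤ y := hall y (by simp)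
    have hys : ∀ z ∈ ys, x ≤ z := fun z hz => hall z (by simp [hz])
    simp only [gRec, wval]
    have h1 := ih x t ht hys
    have h2 : x * t ≤ y * t := mul_le_mul_of_nonneg_right hxy ht
    rw [← max_add_add_left]
    apply max_le
    · refine le_trans h1 (max_le ?_ ?_)
      · exact le_trans (le_max_left _ _) (le_max_left _ _)
      · refine le_trans (by omega : x * t + wval ys (t + 1) ≤ y * t + wval ys (t + 1)) ?_
        exact le_trans (le_max_right _ _) (le_max_left _ _)
    · exact le_max_right _ _

theorem wval_le_gRec (s : List Int) (t : Int) : wval s t ≤ gRec s t := by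
  cases s with
  | nil => simp [wval, gRec]
  | cons x xs => simp only [wval, gRec]; exact le_max_right _ _

theorem fRec_eq_gRec (s : List Int) : ∀ t : Int, 0 ≤ t → s.Pairwise (· ≤ ·) →
    fRec s t = gRec s t := by
  induction s with
  | nil => intro t _ _; simp [fRec, gRec]
  | cons x xs ih =>
    intro t ht hsort
    rw [List.pairwise_cons] at hsort
    have h1 : fRec xs (t + 1) = gRec xs (t + 1) := ih (t + 1) (by omega) hsort.2
    have h2 : fRec xs t = gRec xs t := ih t ht hsort.2
    simp only [fRec, gRec, h1, h2]
    apply le_antisymm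
    · apply max_le
      · exact exchange xs x t ht hsort.1
      · exact le_max_left _ _
    · apply max_le
      · exact le_max_right _ _
      · calc x * t + wval xs (t + 1) ≤ x * t + gRec xs (t + 1) := by
              have := wval_le_gRec xs (t + 1); omega
          _ ≤ max (x * t + gRec xs (t + 1)) (gRec xs t) := le_max_left _ _

-- ===== memoization correctness for port A =====
def MemoOK (s : List Int) (memo : PySem.Dict (Nat × Nat) Int) : Prop :=
  ∀ i t v, memo.get? (i, t) = some v → v = fRec (s.drop i) (t : Int)

theorem pyFindMax_correct (s : List Int) : ∀ (k index time : Nat) (memo : PySem.Dict (Nat × Nat) Int),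
    s.length - index ≤ k → MemoOK s memo →
    (pyFindMax s s.length index time memo).1 = fRec (s.drop index) (time : Int) ∧
      MemoOK s (pyFindMax s s.length index time memo).2 := by
  intro k
  induction k with
  | zero =>
    intro index time memo hk hok
    have hle : s.length ≤ index := by omega
    rw [pyFindMax, if_pos hle]
    rw [List.drop_eq_nil_of_le hle]
    exact ⟨rfl, hok⟩
  | succ k ih =>
    intro index time memo hk hok
    by_cases hle : s.length ≤ index
    · rw [pyFindMax, if_pos hle, List.drop_eq_nil_of_le hle]
      exact ⟨rfl, hok⟩
    · have hlt : index < s.length := by omega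
      rw [pyFindMax, if_neg hle]
      simp only
      by_cases hc : memo.getD (index, time) (-1) ≠ -1
      · rw [if_pos hc]
        cases hget : memo.get? (index, time) with
        | none =>
          exfalso
          apply hc
          rw [PySem.Dict.getD_eq_get?_getD, hget]
          rfl
        | some v =>
          have : memo.getD (index, time) (-1) = v := by
            rw [PySem.Dict.getD_eq_get?_getD, hget]; rfl
          rw [this]
          exact ⟨hok _ _ _ hget, hok⟩
      · rw [if_neg hc]
        obtain ⟨h1v, h1m⟩ := ih (index + 1) (time + 1) memo (by omega) hok
        obtain ⟨h2v, h2m⟩ := ih (index + 1) time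
          (pyFindMax s s.length (index + 1) (time + 1) memo).2 (by omega) h1m
        have hdrop : s.drop index = s[index] :: s.drop (index + 1) :=
          List.drop_eq_getElem_cons hlt
        have hgetD : s.getD index 0 = s[index] := List.getD_eq_getElem s 0 hlt
        have hval : max (s.getD index 0 * (time : Int) +
              (pyFindMax s s.length (index + 1) (time + 1) memo).1)
              (pyFindMax s s.length (index + 1) time
                (pyFindMax s s.length (index + 1) (time + 1) memo).2).1
            = fRec (s.drop index) (time : Int) := by
          rw [h1v, h2v, hdrop, hgetD]
          simp only [fRec]
          norm_num [Nat.cast_add]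
        refine ⟨hval, ?_⟩
        intro i t v hget
        rw [PySem.Dict.get?_insert] at hget
        by_cases heq : (i, t) = ((index : Nat), time)
        · rw [if_pos heq] at hget
          injection heq with hi ht
          subst hi; subst ht
          injection hget with hv
          rw [← hv]
          exact hval
        · rw [if_neg heq] at hget
          exact h2m _ _ _ hget

-- MemoOK holds for the empty memo
theorem memoOK_empty (s : List Int) : MemoOK s PySem.Dict.empty := by
  intro i t v hget
  rw [PySem.Dict.get?_empty] at hget
  exact absurd hget (by simp)

-- ===== VERDICT (by name: the statement is the Claim_ definition above) =====
theorem maxSatisfactionTopDownDP_spec : Claim_equal_maxSatisfactionTopDownDP := by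
  intro satisfaction _
  unfold Spec_maxSatisfactionTopDownDP maxSatisfactionTopDownDP maxSatisfactionTopDownDP_alt
  set ss := PySem.List.sorted satisfaction (fun x => x) false with hss
  have hsorted : ss.Pairwise (· ≤ ·) := PySem.List.sorted_pairwise satisfaction (fun x => x)
  obtain ⟨hval, -⟩ := pyFindMax_correct ss ss.length 0 1 PySem.Dict.empty (by omega) (memoOK_empty ss)
  rw [hval, List.drop_zero]
  simp only [Nat.cast_one]
  rw [fRec_eq_gRec ss 1 (by omega) hsorted, gRec_eq_mPre_rev]
  rw [greedyLoop_eq_mPre ss.reverse 0 le_rfl (by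
    rw [List.pairwise_reverse]; exact hsorted)]
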